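-- pv_equiv track=rewrite | github.com/BiodiversityLab/bioscann | utils/PFITester.py | num_channels_to_positions
-- ===== SOURCE A (Python) =====
-- def num_channels_to_positions(ordered_dict):
--     """Convert the number of channels for each key in the dict to the place of these channels
--     in the channel stack"""
--     current_channel_depth = 0
--     positional_dict = {}
--     for key in ordered_dict:
--         num_channels = ordered_dict[key]
--         position_list = [
--             *range(current_channel_depth, current_channel_depth + num_channels)
--         ]
--         current_channel_depth += num_channels
--         positional_dict[key] = position_list
--     return positional_dict
-- ===== SOURCE B (Python) =====
-- def num_channels_to_positions(ordered_dict):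
--     """Convert the number of channels for each key in the dict to the place of these channels
--     in the channel stack"""
--     counts = list(ordered_dict.values())
--     # prefix table of start offsets: starts[i] = counts[0] + ... + counts[i-1]
--     starts = [0] * len(counts)
--     for i in range(1, len(counts)):
--         starts[i] = starts[i - 1] + counts[i - 1]
--     return {
--         key: list(range(start, start + count))
--         for key, start, count in zip(ordered_dict, starts, counts)
--     }
-- ===== Notes on version B (the rewrite author's own statement) =====
-- stated objective: alternative
-- what changed: B first materialises the per-key counts and a separate prefix-sum table of start offsets, then builds the whole result in a second zip/comprehension pass, instead of A's single loop that interleaves accumulating the running depth with emitting each range.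
import Mathlib
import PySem

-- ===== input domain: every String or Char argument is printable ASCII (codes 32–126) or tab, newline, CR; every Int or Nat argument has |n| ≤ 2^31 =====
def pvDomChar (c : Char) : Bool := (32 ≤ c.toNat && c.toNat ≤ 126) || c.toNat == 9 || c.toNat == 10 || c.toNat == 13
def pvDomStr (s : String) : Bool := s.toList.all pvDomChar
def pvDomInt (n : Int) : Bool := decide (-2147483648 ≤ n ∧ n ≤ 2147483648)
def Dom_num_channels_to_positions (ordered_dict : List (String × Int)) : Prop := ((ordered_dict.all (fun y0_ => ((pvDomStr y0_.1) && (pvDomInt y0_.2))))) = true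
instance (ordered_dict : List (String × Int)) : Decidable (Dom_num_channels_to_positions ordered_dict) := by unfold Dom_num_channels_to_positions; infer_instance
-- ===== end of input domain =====

-- B computes the per-key counts and a separate prefix-sum table of start offsets first,
-- then builds the result in a second zip pass (alternative decomposition; same cost).

-- ===== PORT A =====
-- one loop over the dict: running depth + emit the range for each key
def num_channels_to_positions (ordered_dict : List (String × Int)) : List (String × List Int) :=
  (ordered_dict.foldl
    (fun (st : Int × List (String × List Int)) p =>
      (st.1 + p.2, st.2 ++ [(p.1, PySem.List.pyRange st.1 (st.1 + p.2) 1)]))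
    (0, [])).2

-- ===== PORT B =====
-- prefix table: starts[0] = 0, starts[i] = starts[i-1] + counts[i-1]  (the Python index loop)
def pvStartsLoop (counts : List Int) : List Int :=
  (counts.foldl (fun (st : List Int × Int) c => (st.1 ++ [st.2], st.2 + c)) ([], 0)).1

def num_channels_to_positions_alt (ordered_dict : List (String × Int)) : List (String × List Int) :=
  let counts := ordered_dict.map (·.2)
  let starts := pvStartsLoop counts
  ((ordered_dict.map (·.1)).zip (starts.zip counts)).map
    (fun q => (q.1, PySem.List.pyRange q.2.1 (q.2.1 + q.2.2) 1))

-- ===== PRECONDITION & SPEC =====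
def Spec_num_channels_to_positions (ordered_dict : List (String × Int)) (out : List (String × List Int)) : Prop := out = num_channels_to_positions_alt ordered_dict
instance (ordered_dict : List (String × Int)) (out : List (String × List Int)) : Decidable (Spec_num_channels_to_positions ordered_dict out) := by unfold Spec_num_channels_to_positions; infer_instance

-- ===== CLAIM (what is proved, stated in full; the proofs are below) =====
def Claim_equal_num_channels_to_positions : Prop := ∀ (ordered_dict : List (String × Int)), Dom_num_channels_to_positions ordered_dict → Spec_num_channels_to_positions ordered_dict (num_channels_to_positions ordered_dict)

-- ===== LEMMAS AND PROOFS =====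

-- common reference shape: ranges emitted from a starting depth d
def pvRef (d : Int) : List (String × Int) → List (String × List Int)
  | [] => []
  | p :: rest => (p.1, PySem.List.pyRange d (d + p.2) 1) :: pvRef (d + p.2) rest

lemma pvA_fold (od : List (String × Int)) :
    ∀ (d : Int) (acc : List (String × List Int)),
      (od.foldl
        (fun (st : Int × List (String × List Int)) p =>
          (st.1 + p.2, st.2 ++ [(p.1, PySem.List.pyRange st.1 (st.1 + p.2) 1)]))
        (d, acc)).2 = acc ++ pvRef d od := by
  induction od with
  | nil => intro d acc; simp [pvRef]
  | cons p rest ih =>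
      intro d acc
      simp [List.foldl_cons, ih, pvRef]

-- prefix of B's starts loop from an arbitrary seed
def pvPrefixes (s : Int) : List Int → List Int
  | [] => []
  | c :: cs => s :: pvPrefixes (s + c) cs

lemma pvStarts_fold (cs : List Int) :
    ∀ (l : List Int) (s : Int),
      (cs.foldl (fun (st : List Int × Int) c => (st.1 ++ [st.2], st.2 + c)) (l, s)).1
        = l ++ pvPrefixes s cs := by
  induction cs with
  | nil => intro l s; simp [pvPrefixes]
  | cons c rest ih =>
      intro l s
      simp [List.foldl_cons, ih, pvPrefixes]

lemma pvB_zip (od : List (String × Int)) :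
    ∀ (d : Int),
      ((od.map (·.1)).zip ((pvPrefixes d (od.map (·.2))).zip (od.map (·.2)))).map
        (fun q => (q.1, PySem.List.pyRange q.2.1 (q.2.1 + q.2.2) 1)) = pvRef d od := by
  induction od with
  | nil => intro d; simp [pvRef]
  | cons p rest ih =>
      intro d
      simp [pvPrefixes, pvRef, ih]

-- ===== VERDICT (by name: the statement is the Claim_ definition above) =====
theorem num_channels_to_positions_spec : Claim_equal_num_channels_to_positions := by
  intro od _
  show num_channels_to_positions od = num_channels_to_positions_alt od
  unfold num_channels_to_positions num_channels_to_positions_alt pvStartsLoop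
  simp only []
  rw [pvA_fold, pvStarts_fold]
  simp only [List.nil_append]
  rw [pvB_zip]
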